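-- pv_equiv track=rewrite | github.com/Gisleudo-Cortez/AdventOfCode | 2015/8/python/main.py | parse_calculate_2
-- ===== SOURCE A (Python) =====
-- def parse_calculate_2(data: list[str]) -> tuple[int,int]:
--     total_raw = 0
--     total_encoded = 0
--     for raw_string in data:
--         raw_length = len(raw_string)
--         encoded_string = '"' + raw_string.replace('\\', '\\\\').replace('"', '\\"') + '"'
--         encoded_length = len(encoded_string)
--         total_raw += raw_length
--         total_encoded += encoded_length
--     return (total_raw, total_encoded)
-- ===== SOURCE B (Python) =====
-- def parse_calculate_2(data: list[str]) -> tuple[int, int]: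
--     total_raw = sum(len(s) for s in data)
--     total_encoded = sum(len(s) + 2 + s.count('\\') + s.count('"') for s in data)
--     return (total_raw, total_encoded)
-- ===== Notes on version B (the rewrite author's own statement) =====
-- stated objective: simpler
-- what changed: Instead of materializing the escaped string per line, B computes each encoded length arithmetically as len(s) + 2 + s.count('\\') + s.count('"') and sums the two totals with sum() over generator expressions; no intermediate strings are built.
import Mathlib
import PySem

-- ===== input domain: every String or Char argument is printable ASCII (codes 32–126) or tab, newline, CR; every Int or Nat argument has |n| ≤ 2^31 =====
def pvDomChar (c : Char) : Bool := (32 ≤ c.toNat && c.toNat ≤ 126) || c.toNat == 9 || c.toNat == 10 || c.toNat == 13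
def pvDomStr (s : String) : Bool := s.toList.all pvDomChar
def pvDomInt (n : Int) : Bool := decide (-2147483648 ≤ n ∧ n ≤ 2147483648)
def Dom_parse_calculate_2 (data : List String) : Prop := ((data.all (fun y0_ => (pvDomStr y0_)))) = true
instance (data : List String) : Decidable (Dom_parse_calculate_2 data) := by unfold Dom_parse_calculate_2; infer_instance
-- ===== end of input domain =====

-- B computes each encoded length arithmetically (len + 2 + count of backslashes + count of quotes)
-- instead of building the escaped string; simpler, no intermediate strings.


-- ===== PORT A =====
def parse_calculate_2 (data : List String) : Int × Int :=
  data.foldl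
    (fun (st : Int × Int) raw_string =>
      let raw_length : Int := PySem.Str.len raw_string
      let encoded_string : String :=
        "\"" ++ PySem.Str.replace (PySem.Str.replace raw_string "\\" "\\\\") "\"" "\\\"" ++ "\""
      let encoded_length : Int := PySem.Str.len encoded_string
      (st.1 + raw_length, st.2 + encoded_length))
    (0, 0)

-- ===== PORT B =====
def parse_calculate_2_alt (data : List String) : Int × Int :=
  ((data.map (fun s => (PySem.Str.len s : Int))).sum,
   (data.map (fun s =>
      (PySem.Str.len s : Int) + 2 + (PySem.Str.count s "\\" : Int) + (PySem.Str.count s "\"" : Int))).sum)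

-- ===== PRECONDITION & SPEC =====
def Spec_parse_calculate_2 (data : List String) (out : Int × Int) : Prop := out = parse_calculate_2_alt data
instance (data : List String) (out : Int × Int) : Decidable (Spec_parse_calculate_2 data out) := by unfold Spec_parse_calculate_2; infer_instance

-- ===== CLAIM (what is proved, stated in full; the proofs are below) =====
def Claim_equal_parse_calculate_2 : Prop := ∀ (data : List String), Dom_parse_calculate_2 data → Spec_parse_calculate_2 data (parse_calculate_2 data)

-- ===== LEMMAS AND PROOFS =====

-- replace with a single-char pattern is a flatMap
lemma replace_go_single (c : Char) (new : List Char) :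
    ∀ (l acc : List Char), PySem.Chars.replace.go [c] new l.length l acc
      = acc.reverse ++ l.flatMap (fun x => if x = c then new else [x]) := by
  intro l
  induction l with
  | nil => intro acc; simp [PySem.Chars.replace.go]
  | cons x t ih =>
    intro acc
    simp only [List.length_cons, PySem.Chars.replace.go, List.isPrefixOf]
    by_cases h : x = c
    · simp [h, ih, List.flatMap_cons]
    · have : (c == x) = false := by simp [beq_eq_false_iff_ne]; exact fun e => h e.symm
      simp [this, ih, List.flatMap_cons, h]

lemma replace_single (c : Char) (new : List Char) (l : List Char) :
    PySem.Chars.replace l [c] new = l.flatMap (fun x => if x = c then new else [x]) := by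
  simp [PySem.Chars.replace, replace_go_single]

-- length of a single-char replace with a two-char replacement
lemma length_replace_two (c a b : Char) (l : List Char) :
    (PySem.Chars.replace l [c] [a, b]).length = l.length + l.count c := by
  rw [replace_single]
  induction l with
  | nil => simp
  | cons x t ih =>
    by_cases h : x = c
    · simp [h, ih]
      omega
    · simp [h, ih]
      omega

-- a single-char replace does not change the count of a different char
lemma count_replace_ne (c a b d : Char) (l : List Char) (hd : d ≠ c) (ha : d ≠ a) (hb : d ≠ b) :
    (PySem.Chars.replace l [c] [a, b]).count d = l.count d := by
  rw [replace_single]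
  induction l with
  | nil => simp
  | cons x t ih =>
    by_cases h : x = c
    · simp [h, ih, ha.symm, hb.symm, hd.symm]
    · simp [List.count_cons, ih, h]

-- single-char count is List.count
lemma count_go_single (c : Char) :
    ∀ (l : List Char) (acc : Nat), PySem.Chars.count.go [c] l.length l acc = acc + l.count c := by
  intro l
  induction l with
  | nil => intro acc; simp [PySem.Chars.count.go]
  | cons x t ih =>
    intro acc
    simp only [List.length_cons, PySem.Chars.count.go, List.isPrefixOf]
    by_cases h : x = c
    · simp [h, ih]
      omega
    · have : (c == x) = false := by simp [beq_eq_false_iff_ne]; exact fun e => h e.symm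
      simp [this, ih, h]

lemma count_single (c : Char) (l : List Char) :
    PySem.Chars.count l [c] = l.count c := by
  simp [PySem.Chars.count, count_go_single]

-- per-string arithmetic identity between A's encoded length and B's formula
lemma enc_len (s : String) :
    (PySem.Str.len ("\"" ++ PySem.Str.replace (PySem.Str.replace s "\\" "\\\\") "\"" "\\\"" ++ "\"") : Int)
      = (PySem.Str.len s : Int) + 2 + (PySem.Str.count s "\\" : Int) + (PySem.Str.count s "\"" : Int) := by
  have h1 : PySem.Str.count s "\\" = (s.toList).count '\\' := by
    simp [PySem.Str.count_eq]
    exact count_single '\\' s.toList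
  have h2 : PySem.Str.count s "\"" = (s.toList).count '"' := by
    simp [PySem.Str.count_eq]
    exact count_single '"' s.toList
  have hlen : PySem.Str.len ("\"" ++ PySem.Str.replace (PySem.Str.replace s "\\" "\\\\") "\"" "\\\"" ++ "\"")
      = s.toList.length + s.toList.count '\\' + s.toList.count '"' + 2 := by
    have : ("\"" ++ PySem.Str.replace (PySem.Str.replace s "\\" "\\\\") "\"" "\\\"" ++ "\"").toList
        = '"' :: (PySem.Chars.replace (PySem.Chars.replace s.toList ['\\'] ['\\','\\']) ['"'] ['\\','"']) ++ ['"'] := by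
      simp [PySem.Str.toList_replace]
    simp only [PySem.Str.len, this]
    simp [length_replace_two,
      count_replace_ne '\\' '\\' '\\' '"' s.toList (by decide) (by decide) (by decide)]
    omega
  rw [hlen, h1, h2]
  have hl : (PySem.Str.len s : Int) = (s.toList.length : Int) := by
    simp only [PySem.Str.len]
  rw [hl]
  ring

-- fold invariant: A's running pair equals the accumulator plus B's two sums
lemma fold_inv (data : List String) :
    ∀ (a b : Int),
      data.foldl
        (fun (st : Int × Int) raw_string =>
          let raw_length : Int := PySem.Str.len raw_string
          let encoded_string : String :=
            "\"" ++ PySem.Str.replace (PySem.Str.replace raw_string "\\" "\\\\") "\"" "\\\"" ++ "\""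
          let encoded_length : Int := PySem.Str.len encoded_string
          (st.1 + raw_length, st.2 + encoded_length)) (a, b)
      = (a + (data.map (fun s => (PySem.Str.len s : Int))).sum,
         b + (data.map (fun s =>
            (PySem.Str.len s : Int) + 2 + (PySem.Str.count s "\\" : Int) + (PySem.Str.count s "\"" : Int))).sum) := by
  induction data with
  | nil => intro a b; simp
  | cons s t ih =>
    intro a b
    simp only [List.foldl_cons, List.map_cons, List.sum_cons]
    rw [ih]
    rw [enc_len s]
    rw [Prod.mk.injEq]
    constructor <;> ring

-- ===== VERDICT (by name: the statement is the Claim_ definition above) =====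
theorem parse_calculate_2_spec : Claim_equal_parse_calculate_2 := by
  intro data _
  unfold Spec_parse_calculate_2 parse_calculate_2 parse_calculate_2_alt
  rw [fold_inv data 0 0]
  simp
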